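-- pv_equiv track=rewrite | github.com/johnrobotapps/relentless-drv | relentlessdrv/datastructures/templates.py | _fix_addresses
-- ===== SOURCE A (Python) =====
-- def _fix_addresses(documents):
--     fixed_addresses = set(map(lambda d: list(d)[0], filter(
--         lambda d: not list(d)[0].startswith("."),
--         documents
--     )))
--     for d in documents:
--         k,v = list(d.items())[0]
--         if not k.startswith("."): continue
--         for a in fixed_addresses:
--             if a.endswith(k):
--                 d.update(
--                     {a: d.pop(k)}
--                 )
--     return documents
-- ===== SOURCE B (Python) =====
-- def _fix_addresses(documents):
--     # One pass builds a hash table mapping every '.'-starting suffix of each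
--     # fixed (non-dotted first-key) address to that address; each dotted key is
--     # then renamed by a single table lookup instead of a scan of all addresses.
--     table = {}
--     for d in documents:
--         a = next(iter(d))
--         if not a.startswith("."):
--             for i, ch in enumerate(a):
--                 if ch == ".":
--                     table[a[i:]] = a
--     for d in documents:
--         k = next(iter(d))
--         if k.startswith(".") and k in table:
--             a = table[k]
--             v = d.pop(k)
--             d[a] = v
--     return documents
-- ===== Notes on version B (the rewrite author's own statement) =====
-- stated objective: alternative
-- what changed: Instead of scanning every fixed address for every dotted key (A's nested loops), B builds one hash table mapping every '.'-starting suffix of each fixed address to that address and renames each dotted key by a single table lookup.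
import Mathlib
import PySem

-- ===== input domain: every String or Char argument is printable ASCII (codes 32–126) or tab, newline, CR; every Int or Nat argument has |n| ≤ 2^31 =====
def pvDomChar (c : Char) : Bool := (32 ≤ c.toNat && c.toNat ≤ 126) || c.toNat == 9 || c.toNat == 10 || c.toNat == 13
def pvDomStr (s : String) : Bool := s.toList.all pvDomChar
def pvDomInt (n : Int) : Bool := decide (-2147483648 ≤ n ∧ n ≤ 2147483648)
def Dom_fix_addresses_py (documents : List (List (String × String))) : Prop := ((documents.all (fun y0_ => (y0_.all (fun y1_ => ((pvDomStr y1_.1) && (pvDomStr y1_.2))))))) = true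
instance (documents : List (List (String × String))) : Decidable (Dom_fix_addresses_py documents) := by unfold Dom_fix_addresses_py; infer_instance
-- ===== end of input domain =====

-- B replaces A's scan of every fixed address for every dotted key by a hash table over
-- the '.'-starting suffixes of the fixed addresses, built once (objective: alternative).
-- Python A mutates the dicts in place and returns the same list; the equivalence proved
-- here is about the RETURN value (B performs the same in-place renaming).

-- ===== PORT A =====
-- shared dict primitives on the association lists (each inner list is a Python dict):
-- list(d)[0] — Pre_ guarantees d ≠ []
def pvFirstKey (d : List (String × String)) : String := (d.headD ("", "")).1
-- value of d.pop(k) — Pre_ guarantees k is present where this is evaluated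
def pvPopVal (d : List (String × String)) (k : String) : String :=
  ((d.find? (fun p => p.1 == k)).getD (k, "")).2
-- key removal of d.pop(k)
def pvRemove (d : List (String × String)) (k : String) : List (String × String) :=
  d.filter (fun p => p.1 != k)
-- d.update({a: v}) / d[a] = v : overwrite in place, else append
def pvSetKey (d : List (String × String)) (a v : String) : List (String × String) :=
  if d.any (fun p => p.1 == a) then d.map (fun p => if p.1 == a then (a, v) else p)
  else d ++ [(a, v)]
-- d.update({a: d.pop(k)}) (both Pythons perform exactly this pop-then-set)
def pvApplyFix (d : List (String × String)) (k a : String) : List (String × String) :=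
  pvSetKey (pvRemove d k) a (pvPopVal d k)

def fix_addresses_py (documents : List (List (String × String))) : List (List (String × String)) :=
  let fixed_addresses : PySem.Set String :=
    PySem.Set.ofList
      ((documents.filter (fun d => !(PySem.Str.startswith (pvFirstKey d) "."))).map pvFirstKey)
  -- for d in documents: … (each dict is rewritten independently; fixed_addresses is fixed)
  documents.map (fun d =>
    let k := pvFirstKey d
    if !(PySem.Str.startswith k ".") then d
    else fixed_addresses.foldl (fun d a =>
      if PySem.Str.endswith a k then pvApplyFix d k a else d) d)

-- ===== PORT B =====
-- table[a[i:]] = a for every '.'-position i of every fixed address a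
-- (a[i:] with 0 ≤ i < len(a) is exactly List.drop i.toNat)
def pvSuffixTable (documents : List (List (String × String))) : PySem.Dict String String :=
  documents.foldl (fun t d =>
    let a := pvFirstKey d
    if PySem.Str.startswith a "." then t
    else (PySem.List.enumerate a.toList).foldl (fun t ic =>
      if ic.2 == '.' then t.insert (String.ofList (a.toList.drop ic.1.toNat)) a else t) t)
    PySem.Dict.empty

def fix_addresses_py_alt (documents : List (List (String × String))) : List (List (String × String)) :=
  let table := pvSuffixTable documents
  documents.map (fun d =>
    let k := pvFirstKey d
    if PySem.Str.startswith k "." then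
      match table.get? k with
      | some a => pvApplyFix d k a
      | none => d
    else d)

-- ===== PRECONDITION & SPEC =====
-- Pre_ excludes: (a) documents containing an empty dict (Python A raises IndexError on
-- list(d)[0]); (b) inner lists with duplicate keys, which are not the image of any dict
-- (the dict conversion collapses them); (c) documents in which two DISTINCT fixed
-- addresses both end with the same dotted first key — there Python A pops the key twice
-- and raises KeyError (and the surviving value would depend on set hash order).
def Pre_fix_addresses_py (documents : List (List (String × String))) : Prop :=
  (∀ d ∈ documents, d ≠ [] ∧ (d.map Prod.fst).Nodup) ∧
  (∀ d ∈ documents, ∀ d1 ∈ documents, ∀ d2 ∈ documents,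
    PySem.Str.startswith (pvFirstKey d) "." = true →
    PySem.Str.startswith (pvFirstKey d1) "." = false →
    PySem.Str.startswith (pvFirstKey d2) "." = false →
    PySem.Str.endswith (pvFirstKey d1) (pvFirstKey d) = true →
    PySem.Str.endswith (pvFirstKey d2) (pvFirstKey d) = true →
    pvFirstKey d1 = pvFirstKey d2)
instance (documents : List (List (String × String))) : Decidable (Pre_fix_addresses_py documents) := by
  unfold Pre_fix_addresses_py; infer_instance

def pvWitness_fix_addresses_py : (List (List (String × String))) :=
  [[("box.lamp", "1")], [(".lamp", "on"), ("x", "y")], [("box.fan", "2")]]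

def Spec_fix_addresses_py (documents : List (List (String × String))) (out : List (List (String × String))) : Prop := out = fix_addresses_py_alt documents
instance (documents : List (List (String × String))) (out : List (List (String × String))) : Decidable (Spec_fix_addresses_py documents out) := by unfold Spec_fix_addresses_py; infer_instance

-- ===== CLAIM (what is proved, stated in full; the proofs are below) =====
def Claim_equal_fix_addresses_py : Prop := ∀ (documents : List (List (String × String))), Dom_fix_addresses_py documents → Pre_fix_addresses_py documents → Spec_fix_addresses_py documents (fix_addresses_py documents)

-- ===== LEMMAS AND PROOFS =====

-- the list of fixed addresses before set() is taken
def pvFL (documents : List (List (String × String))) : List String :=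
  (documents.filter (fun d => !(PySem.Str.startswith (pvFirstKey d) "."))).map pvFirstKey

-- A's inner loop when no address matches: the dict is unchanged
theorem pvFold_noMatch (k : String) (d : List (String × String)) (l : List String)
    (h : ∀ a ∈ l, PySem.Str.endswith a k = false) :
    l.foldl (fun d a => if PySem.Str.endswith a k then pvApplyFix d k a else d) d = d := by
  induction l generalizing d with
  | nil => rfl
  | cons a l ih =>
    rw [List.foldl_cons, if_neg (by rw [h a List.mem_cons_self]; simp)]
    exact ih d (fun b hb => h b (List.mem_cons_of_mem _ hb))

-- A's inner loop under nodup + at-most-one-match: it is a find?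
theorem pvFold_char (k : String) (d : List (String × String)) (l : List String)
    (hnd : l.Nodup)
    (huniq : ∀ a ∈ l, ∀ b ∈ l, PySem.Str.endswith a k = true → PySem.Str.endswith b k = true → a = b) :
    l.foldl (fun d a => if PySem.Str.endswith a k then pvApplyFix d k a else d) d
      = match l.find? (fun a => PySem.Str.endswith a k) with
        | some a => pvApplyFix d k a
        | none => d := by
  induction l generalizing d with
  | nil => rfl
  | cons a l ih =>
    by_cases ha : PySem.Str.endswith a k = true
    · have hrest : ∀ b ∈ l, PySem.Str.endswith b k = false := by
        intro b hb
        by_contra hbe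
        have hb' : PySem.Str.endswith b k = true := by
          cases h : PySem.Str.endswith b k with
          | false => exact absurd h hbe
          | true => rfl
        have : a = b := huniq a List.mem_cons_self b (List.mem_cons_of_mem _ hb) ha hb'
        exact (List.nodup_cons.mp hnd).1 (this ▸ hb)
      have hf : List.find? (fun a => PySem.Str.endswith a k) (a :: l) = some a := by
        rw [List.find?_cons, ha]
      rw [List.foldl_cons, if_pos ha, hf]
      exact pvFold_noMatch k _ l hrest
    · have ha' : PySem.Str.endswith a k = false := by
        cases h : PySem.Str.endswith a k with
        | false => rfl
        | true => exact absurd h ha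
      have hf : List.find? (fun a => PySem.Str.endswith a k) (a :: l)
          = List.find? (fun a => PySem.Str.endswith a k) l := by
        rw [List.find?_cons, ha']
      rw [List.foldl_cons, if_neg ha, hf]
      exact ih d (List.nodup_cons.mp hnd).2
        (fun x hx y hy => huniq x (List.mem_cons_of_mem _ hx) y (List.mem_cons_of_mem _ hy))

-- the inner (suffix) fold of B's table builder
def pvInner (a : String) (t : PySem.Dict String String) : PySem.Dict String String :=
  (PySem.List.enumerate a.toList).foldl (fun t ic =>
    if ic.2 == '.' then t.insert (String.ofList (a.toList.drop ic.1.toNat)) a else t) t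

-- soundness of one inner fold: every new binding k ↦ a has a ending with k
theorem pvInner_sound (a : String) (t : PySem.Dict String String) (k b : String)
    (h : (pvInner a t).get? k = some b) :
    t.get? k = some b ∨ (b = a ∧ PySem.Str.endswith a k = true) := by
  unfold pvInner at h
  -- generalize over the enumerate list, keeping the suffix/value facts about its members
  have main : ∀ (l : List (Int × Char)) (t : PySem.Dict String String),
      (∀ ic ∈ l, (String.ofList (a.toList.drop ic.1.toNat)).toList <:+ a.toList) →
      (l.foldl (fun t ic =>
        if ic.2 == '.' then t.insert (String.ofList (a.toList.drop ic.1.toNat)) a else t) t).get? k = some b →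
      t.get? k = some b ∨ (b = a ∧ PySem.Str.endswith a k = true) := by
    intro l
    induction l with
    | nil => intro t _ h; exact Or.inl h
    | cons ic l ih =>
      intro t hmem h
      simp only [List.foldl_cons] at h
      by_cases hc : ic.2 == '.'
      · simp only [if_pos hc] at h
        rcases ih _ (fun x hx => hmem x (List.mem_cons_of_mem _ hx)) h with h' | h'
        · by_cases hk : k = String.ofList (a.toList.drop ic.1.toNat)
          · rw [hk, PySem.Dict.get?_insert_self] at h'
            refine Or.inr ⟨(Option.some.inj h').symm, ?_⟩
            rw [PySem.Str.endswith_eq, PySem.Chars.endswith_iff, hk]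
            exact hmem ic List.mem_cons_self
          · rw [PySem.Dict.get?_insert_of_ne _ _ hk] at h'
            exact Or.inl h'
        · exact Or.inr h'
      · simp only [if_neg hc] at h
        exact ih _ (fun x hx => hmem x (List.mem_cons_of_mem _ hx)) h
  refine main _ t ?_ h
  intro ic _
  simp only [String.toList_ofList]
  exact List.drop_suffix _ _

-- membership in the fixed-address list, cons forms
theorem pvFL_cons_of_mem (d : List (String × String)) (docs : List (List (String × String)))
    (a : String) (h : a ∈ pvFL docs) : a ∈ pvFL (d :: docs) := by
  unfold pvFL at h ⊢
  simp only [List.filter_cons]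
  by_cases hd : (!PySem.Str.startswith (pvFirstKey d) ".") = true
  · rw [if_pos hd]
    simp only [List.map_cons, List.mem_cons]
    exact Or.inr h
  · rw [if_neg hd]
    exact h

theorem pvFL_cons_self (d : List (String × String)) (docs : List (List (String × String)))
    (h : PySem.Str.startswith (pvFirstKey d) "." = false) : pvFirstKey d ∈ pvFL (d :: docs) := by
  unfold pvFL
  simp only [List.filter_cons]
  rw [show (!PySem.Str.startswith (pvFirstKey d) ".") = true by rw [h]; rfl]
  simp

-- soundness of the whole table: every binding k ↦ a comes from a fixed address a with a.endswith(k)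
theorem pvTable_sound (documents : List (List (String × String))) (k a : String)
    (h : (pvSuffixTable documents).get? k = some a) :
    a ∈ pvFL documents ∧ PySem.Str.endswith a k = true := by
  have main : ∀ (docs : List (List (String × String))) (t : PySem.Dict String String),
      (docs.foldl (fun t d =>
        let a := pvFirstKey d
        if PySem.Str.startswith a "." = true then t else pvInner a t) t).get? k = some a →
      t.get? k = some a ∨ (a ∈ pvFL docs ∧ PySem.Str.endswith a k = true) := by
    intro docs
    induction docs with
    | nil => intro t h; exact Or.inl h
    | cons d docs ih =>
      intro t h
      simp only [List.foldl_cons] at h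
      by_cases hd : PySem.Str.startswith (pvFirstKey d) "." = true
      · simp only [hd, if_pos] at h
        rcases ih _ h with h' | h'
        · exact Or.inl h'
        · exact Or.inr ⟨pvFL_cons_of_mem d docs a h'.1, h'.2⟩
      · have hd' : PySem.Str.startswith (pvFirstKey d) "." = false := by
          cases hx : PySem.Str.startswith (pvFirstKey d) "." with
          | false => rfl
          | true => exact absurd hx hd
        simp only [hd', if_neg, Bool.false_eq_true, not_false_iff] at h
        rcases ih _ h with h' | h'
        · rcases pvInner_sound _ _ _ _ h' with h'' | h''
          · exact Or.inl h''
          · exact Or.inr ⟨h''.1 ▸ pvFL_cons_self d docs hd', h''.1 ▸ h''.2⟩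
        · exact Or.inr ⟨pvFL_cons_of_mem d docs a h'.1, h'.2⟩
  have h' := main documents PySem.Dict.empty (by exact h)
  rcases h' with h' | h'
  · exact absurd h' (by intro h'; simp [PySem.Dict.empty, PySem.Dict.get?] at h')
  · exact h'

-- contains is preserved by insert and hence by both folds
theorem pvInner_contains (a : String) (t : PySem.Dict String String) (k : String)
    (h : t.contains k = true) : (pvInner a t).contains k = true := by
  unfold pvInner
  generalize PySem.List.enumerate a.toList = l
  induction l generalizing t with
  | nil => exact h
  | cons ic l ih =>
    simp only [List.foldl_cons]
    by_cases hc : (ic.2 == '.') = true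
    · refine ih _ ?_
      rw [if_pos hc, PySem.Dict.contains_insert, h]
      simp
    · rw [if_neg hc]
      exact ih _ h

-- one inner fold establishes containment of every '.'-starting suffix of a
theorem pvInner_complete (a : String) (t : PySem.Dict String String) (k : String)
    (hk1 : PySem.Str.startswith k "." = true)
    (hk2 : PySem.Str.endswith a k = true) :
    (pvInner a t).contains k = true := by
  rw [PySem.Str.endswith_eq, PySem.Chars.endswith_iff] at hk2
  rw [PySem.Str.startswith_eq, PySem.Chars.startswith_iff] at hk1
  obtain ⟨pre, hpre⟩ := hk2
  -- k starts with '.': its list is '.' :: rest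
  have hdot : ("." : String).toList = ['.'] := by decide
  rw [hdot] at hk1
  obtain ⟨rest, hrest0⟩ := hk1
  have hrest : k.toList = '.' :: rest := by rw [← hrest0]; rfl
  -- the '.'-position inside a
  have hi : pre.length < a.toList.length := by
    rw [← hpre, hrest]; simp
  have hdrop : a.toList.drop pre.length = k.toList := by
    rw [← hpre]; simp
  have hd0 : a.toList.drop pre.length = '.' :: rest := by rw [hdrop, hrest]
  have hget : a.toList[pre.length]'hi = '.' := by
    have h2 : (a.toList.drop pre.length)[0]'(by simp [hd0]) = '.' := by simp [hd0]
    rw [List.getElem_drop] at h2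
    simpa using h2
  -- the corresponding element of enumerate a.toList
  have hmem : ((pre.length : Int), '.') ∈ PySem.List.enumerate a.toList := by
    rw [PySem.List.mem_enumerate_iff]
    exact ⟨pre.length, hi, by simp [hget]⟩
  -- fold over the list: the member establishes containment, later steps preserve it
  unfold pvInner
  have step : ∀ (t : PySem.Dict String String),
      ((fun t (ic : Int × Char) =>
        if ic.2 == '.' then t.insert (String.ofList (a.toList.drop ic.1.toNat)) a else t) t
        ((pre.length : Int), '.')).contains k = true := by
    intro t
    show (if (('.' : Char) == '.') = true then
        t.insert (String.ofList (a.toList.drop ((pre.length : Int)).toNat)) a else t).contains k = true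
    rw [if_pos (by decide)]
    have hk' : String.ofList (a.toList.drop ((pre.length : Int)).toNat) = k := by
      rw [Int.toNat_natCast, hdrop]
      simp
    rw [hk']
    exact PySem.Dict.contains_insert_self _ _ _
  -- generic "established once, preserved after" fold lemma, inlined
  have gen : ∀ (l : List (Int × Char)) (t : PySem.Dict String String),
      (((pre.length : Int), '.') ∈ l ∨ t.contains k = true) →
      (l.foldl (fun t ic =>
        if ic.2 == '.' then t.insert (String.ofList (a.toList.drop ic.1.toNat)) a else t) t).contains k = true := by
    intro l
    induction l with
    | nil =>
      intro t h
      rcases h with h | h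
      · simp at h
      · exact h
    | cons ic l ih =>
      intro t h
      simp only [List.foldl_cons]
      rcases h with h | h
      · rcases List.mem_cons.mp h with h | h
        · refine ih _ (Or.inr ?_)
          rw [← h]
          exact step t
        · exact ih _ (Or.inl h)
      · refine ih _ (Or.inr ?_)
        by_cases hc : ic.2 == '.'
        · simp only [if_pos hc]
          rw [PySem.Dict.contains_insert, h]; simp
        · simp only [hc, if_neg, Bool.false_eq_true, not_false_iff]; exact h
  exact gen _ t (Or.inl hmem)

-- the whole table contains every dotted key matched by some fixed address
theorem pvTable_complete (documents : List (List (String × String))) (k a : String)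
    (hk : PySem.Str.startswith k "." = true)
    (ha : a ∈ pvFL documents)
    (he : PySem.Str.endswith a k = true) :
    (pvSuffixTable documents).contains k = true := by
  unfold pvFL at ha
  rcases List.mem_map.mp ha with ⟨d0, hd0, hfk⟩
  rcases List.mem_filter.mp hd0 with ⟨hd0mem, hd0f⟩
  have hsw : PySem.Str.startswith (pvFirstKey d0) "." = false := by simpa using hd0f
  unfold pvSuffixTable
  have gen : ∀ (docs : List (List (String × String))) (t : PySem.Dict String String),
      (d0 ∈ docs ∨ t.contains k = true) →
      (docs.foldl (fun t d =>
        let a := pvFirstKey d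
        if PySem.Str.startswith a "." = true then t else pvInner a t) t).contains k = true := by
    intro docs
    induction docs with
    | nil =>
      intro t h
      rcases h with h | h
      · simp at h
      · exact h
    | cons d docs ih =>
      intro t h
      simp only [List.foldl_cons]
      rcases h with h | h
      · rcases List.mem_cons.mp h with h | h
        · refine ih _ (Or.inr ?_)
          rw [← h]
          simp only [hsw, Bool.false_eq_true, if_neg, not_false_iff]
          exact pvInner_complete _ t k hk (by rw [hfk]; exact he)
        · exact ih _ (Or.inl h)
      · refine ih _ (Or.inr ?_)
        by_cases hc : PySem.Str.startswith (pvFirstKey d) "." = true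
        · simp only [hc, if_pos]
          exact h
        · have hc' : PySem.Str.startswith (pvFirstKey d) "." = false := by
            cases hx : PySem.Str.startswith (pvFirstKey d) "." with
            | false => rfl
            | true => exact absurd hx hc
          simp only [hc', Bool.false_eq_true, if_neg, not_false_iff]
          exact pvInner_contains _ _ _ h
  exact gen documents PySem.Dict.empty (Or.inl hd0mem)

-- ===== VERDICT (by name: the statement is the Claim_ definition above) =====
theorem fix_addresses_py_spec : Claim_equal_fix_addresses_py := by
  unfold Claim_equal_fix_addresses_py
  intro documents _ hpre
  unfold Spec_fix_addresses_py fix_addresses_py fix_addresses_py_alt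
  dsimp only
  refine List.map_congr_left ?_
  intro d hd
  by_cases hk : PySem.Str.startswith (pvFirstKey d) "." = true
  · rw [if_neg (by rw [hk]; simp), if_pos hk]
    have hnd := PySem.Set.nodup_ofList (pvFL documents)
    have hmemFL : ∀ b ∈ pvFL documents, ∃ d1 ∈ documents,
        PySem.Str.startswith (pvFirstKey d1) "." = false ∧ pvFirstKey d1 = b := by
      intro b hb
      unfold pvFL at hb
      rcases List.mem_map.mp hb with ⟨d1, hd1, hfk1⟩
      rcases List.mem_filter.mp hd1 with ⟨hd1mem, hd1f⟩
      exact ⟨d1, hd1mem, by simpa using hd1f, hfk1⟩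
    have huniq : ∀ x ∈ PySem.Set.ofList (pvFL documents), ∀ y ∈ PySem.Set.ofList (pvFL documents),
        PySem.Str.endswith x (pvFirstKey d) = true → PySem.Str.endswith y (pvFirstKey d) = true → x = y := by
      intro x hx y hy hex hey
      rcases hmemFL x ((PySem.Set.mem_ofList _ _).mp hx) with ⟨d1, hd1, hs1, hf1⟩
      rcases hmemFL y ((PySem.Set.mem_ofList _ _).mp hy) with ⟨d2, hd2, hs2, hf2⟩
      rw [← hf1, ← hf2]
      exact hpre.2 d hd d1 hd1 d2 hd2 hk hs1 hs2 (hf1 ▸ hex) (hf2 ▸ hey)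
    rw [show ((documents.filter (fun d => !(PySem.Str.startswith (pvFirstKey d) "."))).map pvFirstKey)
        = pvFL documents from rfl]
    rw [pvFold_char (pvFirstKey d) d (PySem.Set.ofList (pvFL documents)) hnd huniq]
    cases hg : (pvSuffixTable documents).get? (pvFirstKey d) with
    | some a =>
      have hsound := pvTable_sound documents (pvFirstKey d) a hg
      have hfind : (PySem.Set.ofList (pvFL documents)).find?
          (fun a => PySem.Str.endswith a (pvFirstKey d)) = some a := by
        cases hf : (PySem.Set.ofList (pvFL documents)).find?
            (fun a => PySem.Str.endswith a (pvFirstKey d)) with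
        | none =>
          rw [List.find?_eq_none] at hf
          exact absurd hsound.2 (by simpa using hf a ((PySem.Set.mem_ofList _ _).mpr hsound.1))
        | some x =>
          have hx1 := List.mem_of_find?_eq_some hf
          have hx2 := List.find?_some hf
          rw [huniq x hx1 a ((PySem.Set.mem_ofList _ _).mpr hsound.1) hx2 hsound.2]
      rw [hfind]
    | none =>
      have hnomatch : ∀ b ∈ PySem.Set.ofList (pvFL documents),
          ¬ PySem.Str.endswith b (pvFirstKey d) = true := by
        intro b hb hbe
        have := pvTable_complete documents (pvFirstKey d) b hk ((PySem.Set.mem_ofList _ _).mp hb) hbe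
        rw [PySem.Dict.contains_eq_isSome_get?, hg] at this
        simp at this
      rw [List.find?_eq_none.mpr (by intro b hb; simpa using hnomatch b hb)]
  · have hk' : PySem.Str.startswith (pvFirstKey d) "." = false := by
      cases hx : PySem.Str.startswith (pvFirstKey d) "." with
      | false => rfl
      | true => exact absurd hx hk
    rw [if_pos (by rw [hk']; rfl), if_neg (by rw [hk']; simp)]
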